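-- pv_equiv track=rewrite | github.com/krid78/Advent_of_Code | 2024/python/day14.py | is_christmas_tree
-- ===== SOURCE A (Python) =====
-- def is_christmas_tree(bot_pos, max_row, max_col):
--     """
--     Check if the bot positions form a Christmas tree pattern.
--
--     Args:
--         bot_pos (set[tuple[int, int]]): Set of bot positions (row, col).
--         max_row (int): Maximum rows in the grid.
--         max_col (int): Maximum columns in the grid.
--
--     Returns:
--         bool: True if the bots form a Christmas tree, False otherwise.
--     """
--     rows = {}
--     for r, c in bot_pos:
--         rows.setdefault(r, []).append(c)
--
--     prev_width = 0
--     for i, row in enumerate(sorted(rows)):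
--         cols = sorted(rows[row])
--         if len(cols) <= prev_width and i > 0:
--             return False  # Breite nimmt nicht zu
--         if cols != cols[::-1]:  # Symmetrie prüfen
--             return False
--         prev_width = len(cols)
--
--     return True
-- ===== SOURCE B (Python) =====
-- def is_christmas_tree(bot_pos, max_row, max_col):
--     # Single pass computing (count, min col, max col) per row -- no per-row
--     # column lists and no sorting of columns: a sorted list equals its own
--     # reverse iff all entries coincide, so A's symmetry test collapses to
--     # min == max, and the widths are the per-row counts.
--     stats = {}
--     for r, c in bot_pos:
--         if r in stats:
--             n, lo, hi = stats[r]
--             stats[r] = (n + 1, min(lo, c), max(hi, c))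
--         else:
--             stats[r] = (1, c, c)
--     if any(lo != hi for _, lo, hi in stats.values()):
--         return False
--     widths = [stats[r][0] for r in sorted(stats)]
--     return all(a < b for a, b in zip(widths, widths[1:]))
-- ===== Notes on version B (the rewrite author's own statement) =====
-- stated objective: alternative
-- what changed: B never builds or sorts per-row column lists: one pass keeps (count, min col, max col) per row, the palindrome test on a sorted list is replaced by the equivalent min==max check, and widths are the stored counts read off in sorted-row order.
import Mathlib
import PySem

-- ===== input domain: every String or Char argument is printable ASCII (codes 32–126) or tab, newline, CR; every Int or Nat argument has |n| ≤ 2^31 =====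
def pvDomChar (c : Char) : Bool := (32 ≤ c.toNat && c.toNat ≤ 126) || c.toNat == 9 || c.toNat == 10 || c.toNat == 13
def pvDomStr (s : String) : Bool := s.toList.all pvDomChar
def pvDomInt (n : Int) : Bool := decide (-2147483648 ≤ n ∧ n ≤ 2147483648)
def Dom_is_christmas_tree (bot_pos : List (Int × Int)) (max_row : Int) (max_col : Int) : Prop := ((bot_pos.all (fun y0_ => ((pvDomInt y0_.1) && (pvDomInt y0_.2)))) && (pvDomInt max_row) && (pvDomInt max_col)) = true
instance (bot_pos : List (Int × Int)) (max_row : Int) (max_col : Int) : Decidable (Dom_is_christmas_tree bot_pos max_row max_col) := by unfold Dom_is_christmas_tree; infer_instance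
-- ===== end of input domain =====

-- B replaces A's dict of per-row column lists (each sorted, then compared with its
-- reverse) by a single pass keeping (count, min col, max col) per row: a sorted list
-- equals its reverse iff all entries coincide, so the symmetry test is min == max,
-- and the widths are the stored counts read off in sorted-row order (alternative).

-- ===== PORT A =====
-- the 'for i, row in enumerate(sorted(rows))' loop with its early returns,
-- carrying the enumerate index i and prev_width
def isTreeLoopA (rows : PySem.Dict Int (List Int)) : List Int → Nat → Nat → Bool
  | [], _, _ => true
  | row :: rest, i, prev_width =>
    let cols := PySem.List.sorted (rows.getD row []) (fun x => x) false
    if cols.length ≤ prev_width ∧ 0 < i then false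
    else if cols ≠ (PySem.List.slice? cols none none (-1)).getD [] then false  -- cols != cols[::-1]
    else isTreeLoopA rows rest (i + 1) cols.length

def is_christmas_tree (bot_pos : List (Int × Int)) (max_row : Int) (max_col : Int) : Bool :=
  -- rows.setdefault(r, []).append(c)  ≡  modify r [] (· ++ [c])
  let rows := bot_pos.foldl (fun d p => d.modify p.1 [] (fun x => x ++ [p.2])) PySem.Dict.empty
  isTreeLoopA rows (PySem.List.sorted rows.keys (fun x => x) false) 0 0

-- ===== PORT B =====
-- one step of B's loop: stats[r] = updated (count, lo, hi) triple
def pvStatStep (d : PySem.Dict Int (Int × Int × Int)) (p : Int × Int) : PySem.Dict Int (Int × Int × Int) :=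
  d.insert p.1 (match d.get? p.1 with
    | some s => (s.1 + 1, min s.2.1 p.2, max s.2.2 p.2)   -- if r in stats
    | none => ((1 : Int), p.2, p.2))                       -- else

def is_christmas_tree_alt (bot_pos : List (Int × Int)) (max_row : Int) (max_col : Int) : Bool :=
  let stats := bot_pos.foldl pvStatStep PySem.Dict.empty
  if stats.values.any (fun v => v.2.1 != v.2.2) then false
  else
    let widths := (PySem.List.sorted stats.keys (fun x => x) false).map
      (fun r => (stats.getD r (0, 0, 0)).1)
    -- zip(widths, widths[1:])
    (widths.zip (PySem.List.slice widths (some 1) none)).all (fun w => decide (w.1 < w.2))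

-- ===== PRECONDITION & SPEC =====
def Spec_is_christmas_tree (bot_pos : List (Int × Int)) (max_row : Int) (max_col : Int) (out : Bool) : Prop := out = is_christmas_tree_alt bot_pos max_row max_col
instance (bot_pos : List (Int × Int)) (max_row : Int) (max_col : Int) (out : Bool) : Decidable (Spec_is_christmas_tree bot_pos max_row max_col out) := by unfold Spec_is_christmas_tree; infer_instance

-- ===== CLAIM (what is proved, stated in full; the proofs are below) =====
def Claim_equal_is_christmas_tree : Prop := ∀ (bot_pos : List (Int × Int)) (max_row : Int) (max_col : Int), Dom_is_christmas_tree bot_pos max_row max_col → Spec_is_christmas_tree bot_pos max_row max_col (is_christmas_tree bot_pos max_row max_col)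

-- ===== LEMMAS AND PROOFS =====

-- the per-row column list of l at row r, in l's order
def pvColsAt (l : List (Int × Int)) (r : Int) : List Int := (l.filter (fun p => p.1 == r)).map (·.2)

-- the shape A's fused loop reduces to: loop over a list of column lists
def pvLoopC : List (List Int) → Nat → Nat → Bool
  | [], _, _ => true
  | cols :: rest, i, w =>
    if cols.length ≤ w ∧ 0 < i then false
    else if cols ≠ cols.reverse then false
    else pvLoopC rest (i + 1) cols.length

-- two-pass check on a list of column lists
def pvCheck (gl : List (List Int)) : Bool :=
  ((gl.map List.length).zip ((gl.map List.length).tail)).all (fun w => decide (w.1 < w.2)) &&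
    gl.all (fun c => c == c.reverse)

lemma loopC_pos (gl : List (List Int)) :
    ∀ (w : Nat) (i : Nat),
      pvLoopC gl (i + 1) w =
        (((w :: gl.map List.length).zip (gl.map List.length)).all (fun p => decide (p.1 < p.2)) &&
          gl.all (fun c => c == c.reverse)) := by
  induction gl with
  | nil => intro w i; simp [pvLoopC]
  | cons c rest ih =>
    intro w i
    simp only [pvLoopC, List.map_cons, List.zip_cons_cons, List.all_cons]
    by_cases h1 : c.length ≤ w
    · rw [if_pos ⟨h1, Nat.succ_pos i⟩]
      simp [Nat.not_lt.mpr h1]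
    · rw [if_neg (by tauto)]
      have hw : w < c.length := Nat.lt_of_not_le h1
      by_cases h2 : c = c.reverse
      · rw [if_neg (by simpa using h2), ih c.length (i + 1)]
        rw [show (c == c.reverse) = true by simpa using h2]
        simp [hw]
      · rw [if_pos (by simpa using h2)]
        rw [show (c == c.reverse) = false by simpa using h2]
        simp

lemma loopC_zero (gl : List (List Int)) : pvLoopC gl 0 0 = pvCheck gl := by
  cases gl with
  | nil => rfl
  | cons c rest =>
    simp only [pvLoopC, pvCheck, List.map_cons, List.tail_cons, List.all_cons]
    rw [if_neg (by omega)]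
    by_cases h2 : c = c.reverse
    · rw [if_neg (by simpa using h2), loopC_pos rest c.length 0]
      rw [show (c == c.reverse) = true by simpa using h2]
      simp
    · rw [if_pos (by simpa using h2)]
      rw [show (c == c.reverse) = false by simpa using h2]
      simp

lemma loopA_eq (rows : PySem.Dict Int (List Int)) :
    ∀ (l : List Int) (i w : Nat),
      isTreeLoopA rows l i w =
        pvLoopC (l.map (fun r => PySem.List.sorted (rows.getD r []) (fun x => x) false)) i w := by
  intro l
  induction l with
  | nil => intro i w; rfl
  | cons row rest ih =>
    intro i w
    simp only [isTreeLoopA, pvLoopC, List.map_cons, PySem.List.slice?_none_none_neg_one,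
      Option.getD_some]
    split_ifs
    · rfl
    · rfl
    · exact ih _ _

lemma A_unfold (bp : List (Int × Int)) (mr mc : Int) :
    is_christmas_tree bp mr mc =
      pvLoopC ((PySem.List.sorted (PySem.Set.ofList (bp.map (·.1))) (fun x => x) false).map
        (fun r => PySem.List.sorted (pvColsAt bp r) (fun x => x) false)) 0 0 := by
  have hkeys : (List.foldl (fun d p => d.modify p.1 [] fun x => x ++ [p.2])
      (PySem.Dict.empty : PySem.Dict Int (List Int)) bp).keys = PySem.Set.ofList (bp.map (·.1)) := by
    rw [PySem.Dict.keys_foldl_modify_key bp (fun p => p.1) [] (fun _ p x => x ++ [p.2])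
        PySem.Dict.empty, PySem.Dict.keys_empty, PySem.Set.update_nil_left]
  have hget : ∀ r, (List.foldl (fun d p => d.modify p.1 [] fun x => x ++ [p.2])
      (PySem.Dict.empty : PySem.Dict Int (List Int)) bp).getD r [] = pvColsAt bp r := by
    intro r
    rw [PySem.Dict.getD_foldl_modify_append bp PySem.Dict.empty r, PySem.Dict.getD_empty]
    rfl
  simp only [is_christmas_tree]
  rw [loopA_eq, hkeys]
  congr 1
  exact List.map_congr_left (fun r _ => by rw [hget r])

-- ---- B side ----

-- the per-column accumulator B's fold applies at a fixed row
def pvG (o : Option (Int × Int × Int)) (c : Int) : Option (Int × Int × Int) :=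
  match o with
  | some s => some (s.1 + 1, min s.2.1 c, max s.2.2 c)
  | none => some ((1 : Int), c, c)

lemma statsFold_get? (l : List (Int × Int)) :
    ∀ (d : PySem.Dict Int (Int × Int × Int)) (r : Int),
      (l.foldl pvStatStep d).get? r = (pvColsAt l r).foldl pvG (d.get? r) := by
  induction l with
  | nil => intro d r; rfl
  | cons p t ih =>
    intro d r
    simp only [List.foldl_cons]
    rw [ih]
    by_cases h : p.1 = r
    · have hc : pvColsAt (p :: t) r = p.2 :: pvColsAt t r := by
        simp [pvColsAt, h]
      rw [hc, List.foldl_cons]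
      congr 1
      unfold pvStatStep
      rw [h, PySem.Dict.get?_insert_self]
      cases d.get? r <;> rfl
    · have hc : pvColsAt (p :: t) r = pvColsAt t r := by
        simp [pvColsAt, h]
      rw [hc]
      congr 1
      unfold pvStatStep
      exact PySem.Dict.get?_insert_of_ne d _ (Ne.symm h)

lemma statsFold_keys (l : List (Int × Int)) :
    (l.foldl pvStatStep PySem.Dict.empty).keys = PySem.Set.ofList (l.map (·.1)) := by
  rw [show pvStatStep = (fun d p => d.insert p.1 ((fun d p => match PySem.Dict.get? d p.1 with
    | some s => (s.1 + 1, min s.2.1 p.2, max s.2.2 p.2)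
    | none => ((1 : Int), p.2, p.2)) d p)) from rfl]
  rw [PySem.Dict.keys_foldl_insert_key l (fun p => p.1) _ PySem.Dict.empty,
    PySem.Dict.keys_empty, PySem.Set.update_nil_left]

lemma statsFold_nodup (l : List (Int × Int)) :
    (l.foldl pvStatStep PySem.Dict.empty).keys.Nodup := by
  rw [statsFold_keys]
  exact PySem.Set.nodup_ofList _

lemma pvG_some (cs : List Int) :
    ∀ (a : Int × Int × Int),
      cs.foldl pvG (some a) =
        some (a.1 + cs.length, cs.foldl min a.2.1, cs.foldl max a.2.2) := by
  induction cs with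
  | nil => intro a; simp
  | cons c t ih =>
    intro a
    simp only [List.foldl_cons]
    rw [show pvG (some a) c = some (a.1 + 1, min a.2.1 c, max a.2.2 c) from rfl, ih]
    have : a.1 + 1 + (t.length : Int) = a.1 + ((t.length : Int) + 1) := by ring
    simp [this]

lemma pvStat_cons (c : Int) (cs : List Int) :
    (c :: cs).foldl pvG none =
      some ((1 : Int) + cs.length, cs.foldl min c, cs.foldl max c) := by
  rw [List.foldl_cons, show pvG none c = some ((1 : Int), c, c) from rfl, pvG_some]

lemma foldl_min_le (cs : List Int) :
    ∀ (a : Int), cs.foldl min a ≤ a ∧ ∀ x ∈ cs, cs.foldl min a ≤ x := by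
  induction cs with
  | nil => intro a; simp
  | cons c t ih =>
    intro a
    obtain ⟨h1, h2⟩ := ih (min a c)
    refine ⟨le_trans h1 (min_le_left a c), ?_⟩
    intro x hx
    rcases List.mem_cons.mp hx with rfl | hx'
    · exact le_trans h1 (min_le_right a x)
    · exact h2 x hx'

lemma foldl_max_ge (cs : List Int) :
    ∀ (a : Int), a ≤ cs.foldl max a ∧ ∀ x ∈ cs, x ≤ cs.foldl max a := by
  induction cs with
  | nil => intro a; simp
  | cons c t ih =>
    intro a
    obtain ⟨h1, h2⟩ := ih (max a c)
    refine ⟨le_trans (le_max_left a c) h1, ?_⟩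
    intro x hx
    rcases List.mem_cons.mp hx with rfl | hx'
    · exact le_trans (le_max_right a x) h1
    · exact h2 x hx'

lemma foldl_min_mem (cs : List Int) :
    ∀ (a : Int), cs.foldl min a = a ∨ cs.foldl min a ∈ cs := by
  induction cs with
  | nil => intro a; simp
  | cons c t ih =>
    intro a
    rcases ih (min a c) with h | h
    · rw [List.foldl_cons, h]
      rcases min_cases a c with ⟨h', _⟩ | ⟨h', _⟩
      · exact Or.inl h'
      · exact Or.inr (by rw [h']; exact List.mem_cons_self)
    · exact Or.inr (List.mem_cons_of_mem _ h)

lemma foldl_max_mem (cs : List Int) :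
    ∀ (a : Int), cs.foldl max a = a ∨ cs.foldl max a ∈ cs := by
  induction cs with
  | nil => intro a; simp
  | cons c t ih =>
    intro a
    rcases ih (max a c) with h | h
    · rw [List.foldl_cons, h]
      rcases max_cases a c with ⟨h', _⟩ | ⟨h', _⟩
      · exact Or.inl h'
      · exact Or.inr (by rw [h']; exact List.mem_cons_self)
    · exact Or.inr (List.mem_cons_of_mem _ h)

-- a sorted list is a palindrome iff all its elements are equal iff min = max
lemma sorted_palindrome_iff (cols : List Int) (c : Int) (cs : List Int)
    (hne : cols = c :: cs) :
    (PySem.List.sorted cols (fun x => x) false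
        = (PySem.List.sorted cols (fun x => x) false).reverse)
      ↔ cs.foldl min c = cs.foldl max c := by
  set S := PySem.List.sorted cols (fun x => x) false with hS
  have hperm : S.Perm cols := PySem.List.sorted_perm cols (fun x => x) false
  have hpw : S.Pairwise (· ≤ ·) := by
    simpa using PySem.List.sorted_pairwise cols (fun x => x)
  have hlo_mem : cs.foldl min c ∈ cols := by
    rcases foldl_min_mem cs c with h | h
    · rw [h, hne]; exact List.mem_cons_self
    · rw [hne]; exact List.mem_cons_of_mem _ h
  have hhi_mem : cs.foldl max c ∈ cols := by
    rcases foldl_max_mem cs c with h | h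
    · rw [h, hne]; exact List.mem_cons_self
    · rw [hne]; exact List.mem_cons_of_mem _ h
  have hlo_le : ∀ x ∈ cols, cs.foldl min c ≤ x := by
    intro x hx
    rw [hne] at hx
    rcases List.mem_cons.mp hx with rfl | hx'
    · exact (foldl_min_le cs x).1
    · exact (foldl_min_le cs c).2 x hx'
  have hhi_ge : ∀ x ∈ cols, x ≤ cs.foldl max c := by
    intro x hx
    rw [hne] at hx
    rcases List.mem_cons.mp hx with rfl | hx'
    · exact (foldl_max_ge cs x).1
    · exact (foldl_max_ge cs c).2 x hx'
  constructor
  · intro hpal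
    have hpw' : S.Pairwise (fun a b => b ≤ a) := by
      rw [hpal]
      exact List.pairwise_reverse.mpr hpw
    cases hSc : S with
    | nil =>
      have h2 := hperm.symm
      rw [hSc] at h2
      have hcols : cols = [] := h2.eq_nil
      rw [hne] at hcols; cases hcols
    | cons h t =>
      have hall : ∀ x ∈ S, x = h := by
        intro x hx
        rw [hSc] at hx
        rcases List.mem_cons.mp hx with rfl | hx'
        · rfl
        · rw [hSc] at hpw hpw'
          exact le_antisymm ((List.pairwise_cons.mp hpw').1 x hx')
            ((List.pairwise_cons.mp hpw).1 x hx') |>.symm ▸ rfl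
      have hlo : cs.foldl min c = h := hall _ (hperm.mem_iff.mpr hlo_mem)
      have hhi : cs.foldl max c = h := hall _ (hperm.mem_iff.mpr hhi_mem)
      rw [hlo, hhi]
  · intro heq
    have hall : ∀ x ∈ S, x = cs.foldl min c := by
      intro x hx
      have hx' : x ∈ cols := hperm.mem_iff.mp hx
      have := hhi_ge x hx'
      rw [← heq] at this
      exact le_antisymm this (hlo_le x hx')
    have hrep : S = List.replicate S.length (cs.foldl min c) :=
      List.eq_replicate_of_mem hall
    rw [hrep, List.reverse_replicate]

-- key membership ↔ the row has columns
lemma mem_rows_iff (bp : List (Int × Int)) (r : Int) :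
    r ∈ PySem.Set.ofList (bp.map (·.1)) ↔ pvColsAt bp r ≠ [] := by
  rw [PySem.Set.mem_ofList]
  constructor
  · intro hr hnil
    obtain ⟨p, hp, hp1⟩ := List.mem_map.mp hr
    have hmem : p ∈ bp.filter (fun q => q.1 == r) := List.mem_filter.mpr ⟨hp, by simp [hp1]⟩
    rw [pvColsAt, List.map_eq_nil_iff] at hnil
    rw [hnil] at hmem
    cases hmem
  · intro h
    by_contra hc
    apply h
    rw [pvColsAt, List.map_eq_nil_iff, List.filter_eq_nil_iff]
    intro p hp hbeq
    exact hc (List.mem_map.mpr ⟨p, hp, by simpa using hbeq⟩)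

-- ===== VERDICT (by name: the statement is the Claim_ definition above) =====
theorem is_christmas_tree_spec : Claim_equal_is_christmas_tree := by
  intro bp mr mc _
  show is_christmas_tree bp mr mc = is_christmas_tree_alt bp mr mc
  rw [A_unfold bp mr mc, loopC_zero]
  simp only [is_christmas_tree_alt]
  set stats := bp.foldl pvStatStep PySem.Dict.empty with hstats
  have hkeys : stats.keys = PySem.Set.ofList (bp.map (·.1)) := statsFold_keys bp
  have hnd : stats.keys.Nodup := statsFold_nodup bp
  have hget : ∀ r, stats.get? r = (pvColsAt bp r).foldl pvG none := by
    intro r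
    rw [hstats, statsFold_get? bp PySem.Dict.empty r, PySem.Dict.get?_empty]
  -- per-key facts: for each key r, cols ≠ [], and getD gives the (count, lo, hi) triple
  have hkey_stat : ∀ r ∈ stats.keys, ∃ c cs, pvColsAt bp r = c :: cs ∧
      stats.getD r (0, 0, 0) = ((1 : Int) + cs.length, cs.foldl min c, cs.foldl max c) := by
    intro r hr
    have hne : pvColsAt bp r ≠ [] := (mem_rows_iff bp r).mp (hkeys ▸ hr)
    obtain ⟨c, cs, hcc⟩ : ∃ c cs, pvColsAt bp r = c :: cs := by
      cases h : pvColsAt bp r with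
      | nil => exact absurd h hne
      | cons a b => exact ⟨a, b, rfl⟩
    refine ⟨c, cs, hcc, ?_⟩
    apply PySem.Dict.getD_of_get?_eq_some
    rw [hget r, hcc, pvStat_cons]
  -- symmetry pass of A = values.any of B, negated
  have hsym : (((PySem.List.sorted (PySem.Set.ofList (bp.map (·.1))) (fun x => x) false).map
        (fun r => PySem.List.sorted (pvColsAt bp r) (fun x => x) false)).all
        (fun c => c == c.reverse))
      = !(stats.values.any (fun v => v.2.1 != v.2.2)) := by
    rw [PySem.Dict.values_eq_map_keys stats hnd (0, 0, 0)]
    rcases Bool.eq_false_or_eq_true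
        ((stats.keys.map (fun k => stats.getD k (0, 0, 0))).any (fun v => v.2.1 != v.2.2)) with hA | hA
    · -- a bad value exists: some row is not a palindrome
      rw [hA, Bool.not_true]
      rw [List.any_eq_true] at hA
      obtain ⟨v, hv, hbad⟩ := hA
      rw [List.mem_map] at hv
      obtain ⟨r, hr, rfl⟩ := hv
      obtain ⟨c, cs, hcc, hD⟩ := hkey_stat r hr
      rw [hD] at hbad
      simp only [bne_iff_ne, ne_eq] at hbad
      rw [List.all_eq_false]
      refine ⟨PySem.List.sorted (pvColsAt bp r) (fun x => x) false,
        List.mem_map.mpr ⟨r, ?_, rfl⟩, ?_⟩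
      · rw [← hkeys]
        exact (PySem.List.mem_sorted _ _ _ _).mpr hr
      · simpa using fun h => hbad ((sorted_palindrome_iff (pvColsAt bp r) c cs hcc).mp h)
    · -- no bad value: every row is constant
      rw [hA, Bool.not_false]
      rw [List.any_eq_false] at hA
      rw [List.all_eq_true]
      intro S hS
      rw [List.mem_map] at hS
      obtain ⟨r, hr, rfl⟩ := hS
      have hr' : r ∈ stats.keys := by rw [hkeys]; exact (PySem.List.mem_sorted _ _ _ _).mp hr
      obtain ⟨c, cs, hcc, hD⟩ := hkey_stat r hr'
      have hbad := hA _ (List.mem_map.mpr ⟨r, hr', rfl⟩)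
      rw [hD] at hbad
      simp only [bne_iff_ne, ne_eq, not_not] at hbad
      simpa using (sorted_palindrome_iff (pvColsAt bp r) c cs hcc).mpr hbad
  -- widths pass: Nat lengths of A's per-row lists = Int counts stored by B
  have hwid : (((PySem.List.sorted (PySem.Set.ofList (bp.map (·.1))) (fun x => x) false).map
        (fun r => PySem.List.sorted (pvColsAt bp r) (fun x => x) false)).map List.length)
      = ((PySem.List.sorted stats.keys (fun x => x) false).map
          (fun r => (stats.getD r (0, 0, 0)).1)).map Int.toNat := by
    rw [hkeys, List.map_map, List.map_map]
    apply List.map_congr_left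
    intro r hr
    have hr' : r ∈ stats.keys := by rw [hkeys]; exact (PySem.List.mem_sorted _ _ _ _).mp hr
    obtain ⟨c, cs, hcc, hD⟩ := hkey_stat r hr'
    simp only [Function.comp_apply]
    rw [PySem.List.length_sorted, hcc, hD]
    simp
    omega
  -- widths are positive ints, so Int < on them agrees with Nat < on the toNats
  have hpos : ∀ w ∈ (PySem.List.sorted stats.keys (fun x => x) false).map
      (fun r => (stats.getD r (0, 0, 0)).1), 1 ≤ w := by
    intro w hw
    rw [List.mem_map] at hw
    obtain ⟨r, hr, rfl⟩ := hw
    have hr' : r ∈ stats.keys := (PySem.List.mem_sorted _ _ _ _).mp hr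
    obtain ⟨c, cs, hcc, hD⟩ := hkey_stat r hr'
    rw [hD]
    have : (0 : Int) ≤ cs.length := Int.ofNat_nonneg _
    omega
  rcases Bool.eq_false_or_eq_true (stats.values.any (fun v => v.2.1 != v.2.2)) with hA | hA
  · -- a bad value: both sides are false
    rw [hA, if_pos rfl, pvCheck, hsym, hA]
    simp
  · -- B's early return does not fire
    rw [hA, if_neg (by simp)]
    set ws := (PySem.List.sorted stats.keys (fun x => x) false).map
      (fun r => (stats.getD r (0, 0, 0)).1) with hws
    rw [pvCheck, hsym, hA, Bool.not_false, Bool.and_true, hwid]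
    rw [PySem.List.slice_from_one]
    -- pointwise: Int < agrees with Nat < via toNat on positive entries
    have : ∀ (l : List Int), (∀ w ∈ l, 1 ≤ w) →
        (((l.map Int.toNat).zip (l.map Int.toNat).tail).all (fun w => decide (w.1 < w.2)))
          = ((l.zip l.tail).all (fun w => decide (w.1 < w.2))) := by
      intro l
      induction l with
      | nil => intro _; rfl
      | cons a t ih =>
        intro hmem
        cases t with
        | nil => rfl
        | cons b u =>
          have ih' := ih (fun w hw => hmem w (List.mem_cons_of_mem _ hw))
          simp only [List.map_cons, List.tail_cons, List.zip_cons_cons, List.all_cons] at ih' ⊢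
          rw [ih']
          have ha : 1 ≤ a := hmem a List.mem_cons_self
          have hb : 1 ≤ b := hmem b (List.mem_cons_of_mem _ List.mem_cons_self)
          congr 1
          rcases Int.lt_or_le a b with h | h
          · rw [decide_eq_true (by omega : a.toNat < b.toNat), decide_eq_true h]
          · rw [decide_eq_false (by omega : ¬ a.toNat < b.toNat), decide_eq_false (by omega)]
    rw [this ws hpos]
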